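-- pv_equiv track=rewrite | github.com/taishi-n/oobss | src/oobss/experiments/engine.py | merge_method_grids
-- ===== SOURCE A (Python) =====
-- from typing import Callable, Iterable, Mapping, Sequence, cast
--
-- def merge_method_grids(
--     base: Mapping[str, Mapping[str, Sequence[object]]] | None,
--     overrides: Mapping[str, Mapping[str, Sequence[object]]] | None,
-- ) -> dict[str, dict[str, list[object]]]:
--     """Merge two method grid mappings with override precedence."""
--     merged: dict[str, dict[str, list[object]]] = {}
--     for method_id, params in (base or {}).items():
--         merged[method_id] = {key: list(values) for key, values in params.items()}
--     for method_id, params in (overrides or {}).items():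
--         method_entry = merged.setdefault(method_id, {})
--         for key, values in params.items():
--             method_entry[key] = list(values)
--     return merged
-- ===== SOURCE B (Python) =====
-- def merge_method_grids(base, overrides):
--     """Merge two method grid mappings with override precedence.
--
--     Purely functional recursive decomposition: no dict is ever mutated; each
--     result dict is assembled once by recursion on the base items, peeling the
--     consumed entry off the overrides before recursing."""
--
--     def merge_params(bitems, op):
--         if not bitems:
--             return {key: list(values) for key, values in op.items()}
--         key, values = bitems[0]
--         rest = merge_params(bitems[1:], {k: v for k, v in op.items() if k != key})
--         return {key: list(op.get(key, values)), **rest}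
--
--     def merge(bitems, o):
--         if not bitems:
--             return {m: {k: list(v) for k, v in p.items()} for m, p in o.items()}
--         method_id, params = bitems[0]
--         entry = merge_params(list(params.items()), o.get(method_id, {}))
--         rest = merge(bitems[1:], {m: p for m, p in o.items() if m != method_id})
--         return {method_id: entry, **rest}
--
--     return merge(list((base or {}).items()), dict(overrides or {}))
-- ===== Notes on version B (the rewrite author's own statement) =====
-- stated objective: alternative
-- what changed: A builds a mutable result dict in two staged passes (copy every base entry, then overlay overrides via setdefault and in-place inner-dict mutation); B is a purely functional recursion on the base items that assembles each merged dict exactly once, removing the consumed override entry before each recursive call and emitting the leftover overrides in the base case. Pre_ excludes association lists whose outer or inner key lists contain duplicates, which do not encode any Python dict argument.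
import Mathlib
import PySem

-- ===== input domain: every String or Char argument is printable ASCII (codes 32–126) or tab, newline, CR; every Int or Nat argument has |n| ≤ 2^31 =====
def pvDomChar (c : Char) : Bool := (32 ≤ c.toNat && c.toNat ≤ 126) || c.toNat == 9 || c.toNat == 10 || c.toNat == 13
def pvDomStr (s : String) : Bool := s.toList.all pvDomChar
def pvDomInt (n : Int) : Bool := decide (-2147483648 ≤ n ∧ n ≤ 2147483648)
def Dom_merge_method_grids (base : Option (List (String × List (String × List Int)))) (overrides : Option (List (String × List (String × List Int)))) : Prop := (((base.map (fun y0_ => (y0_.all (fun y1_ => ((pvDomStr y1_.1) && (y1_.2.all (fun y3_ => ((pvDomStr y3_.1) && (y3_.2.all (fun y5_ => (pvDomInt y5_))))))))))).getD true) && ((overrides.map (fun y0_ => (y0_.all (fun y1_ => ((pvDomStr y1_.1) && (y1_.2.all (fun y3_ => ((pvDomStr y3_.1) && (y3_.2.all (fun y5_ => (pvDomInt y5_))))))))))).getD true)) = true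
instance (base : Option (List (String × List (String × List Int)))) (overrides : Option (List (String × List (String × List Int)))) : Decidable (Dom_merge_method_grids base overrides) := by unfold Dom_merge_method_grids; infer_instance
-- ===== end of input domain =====

-- B replaces A's copy-base-then-mutate dict passes by a purely functional recursion on the
-- base items that assembles each result dict once, peeling consumed entries off the overrides.

-- ===== PORT A =====
def merge_method_grids (base : Option (List (String × List (String × List Int)))) (overrides : Option (List (String × List (String × List Int)))) : List (String × List (String × List Int)) :=
  -- merged = {}; for method_id, params in (base or {}).items(): merged[method_id] = {k: list(v) …}
  let merged : PySem.Dict String (PySem.Dict String (List Int)) :=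
    (base.getD []).foldl
      (fun m p => m.insert p.1 (p.2.foldl (fun e q => e.insert q.1 q.2) PySem.Dict.empty))
      PySem.Dict.empty
  -- for method_id, params in (overrides or {}).items(): entry = merged.setdefault(…); entry[k] = list(v)
  let merged2 : PySem.Dict String (PySem.Dict String (List Int)) :=
    (overrides.getD []).foldl
      (fun m p =>
        p.2.foldl (fun m2 q => m2.modify p.1 PySem.Dict.empty (fun e => e.insert q.1 q.2))
          (m.setdefault p.1 PySem.Dict.empty))
      merged
  merged2.items.map (fun p => (p.1, p.2.items))

-- ===== PORT B =====
-- def merge_params(bitems, op): recursion on the base items; '{key: x, **rest}' is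
-- 'start from {key: x} and insert every item of rest'.
def pvMergeParams (bitems : List (String × List Int)) (op : List (String × List Int)) : List (String × List Int) :=
  match bitems with
  | [] => (op.foldl (fun d q => d.insert q.1 q.2) PySem.Dict.empty).items
  | (key, values) :: rest =>
      let restm := pvMergeParams rest (op.filter (fun q => q.1 != key))
      (restm.foldl (fun d q => d.insert q.1 q.2)
        (PySem.Dict.empty.insert key ((PySem.Dict.mk op).getD key values))).items

-- def merge(bitems, o): recursion on the base items, overrides entry for the consumed
-- method removed before recursing.
def pvMergeOuter (bitems : List (String × List (String × List Int))) (o : List (String × List (String × List Int))) : List (String × List (String × List Int)) :=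
  match bitems with
  | [] => (o.foldl (fun d q => d.insert q.1 ((q.2.foldl (fun e r => e.insert r.1 r.2) PySem.Dict.empty).items)) PySem.Dict.empty).items
  | (method_id, params) :: rest =>
      let entry := pvMergeParams params ((PySem.Dict.mk o).getD method_id [])
      let restm := pvMergeOuter rest (o.filter (fun q => q.1 != method_id))
      (restm.foldl (fun d q => d.insert q.1 q.2)
        (PySem.Dict.empty.insert method_id entry)).items

def merge_method_grids_alt (base : Option (List (String × List (String × List Int)))) (overrides : Option (List (String × List (String × List Int)))) : List (String × List (String × List Int)) :=
  pvMergeOuter (base.getD []) (overrides.getD [])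

-- ===== PRECONDITION & SPEC =====
-- Pre_ excludes association lists in which an outer (method-id) key list or an inner
-- (parameter) key list has duplicates: such lists do not encode any Python dict argument
-- (a dict always has distinct keys), so A's behaviour there corresponds to no Python input.
def Pre_merge_method_grids (base : Option (List (String × List (String × List Int)))) (overrides : Option (List (String × List (String × List Int)))) : Prop :=
  ((((base.getD []).map Prod.fst).Nodup) ∧ ∀ p ∈ base.getD [], (p.2.map Prod.fst).Nodup) ∧
  ((((overrides.getD []).map Prod.fst).Nodup) ∧ ∀ p ∈ overrides.getD [], (p.2.map Prod.fst).Nodup)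
instance (base : Option (List (String × List (String × List Int)))) (overrides : Option (List (String × List (String × List Int)))) : Decidable (Pre_merge_method_grids base overrides) := by unfold Pre_merge_method_grids; infer_instance

def pvWitness_merge_method_grids : (Option (List (String × List (String × List Int)))) × (Option (List (String × List (String × List Int)))) :=
  (some [("m1", [("lr", [1, 2])]), ("m2", [])], some [("m2", [("k", [3])]), ("m3", [])])

def Spec_merge_method_grids (base : Option (List (String × List (String × List Int)))) (overrides : Option (List (String × List (String × List Int)))) (out : List (String × List (String × List Int))) : Prop := out = merge_method_grids_alt base overrides
instance (base : Option (List (String × List (String × List Int)))) (overrides : Option (List (String × List (String × List Int)))) (out : List (String × List (String × List Int))) : Decidable (Spec_merge_method_grids base overrides out) := by unfold Spec_merge_method_grids; infer_instance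

-- ===== CLAIM (what is proved, stated in full; the proofs are below) =====
def Claim_equal_merge_method_grids : Prop := ∀ (base : Option (List (String × List (String × List Int)))) (overrides : Option (List (String × List (String × List Int)))), Dom_merge_method_grids base overrides → Pre_merge_method_grids base overrides → Spec_merge_method_grids base overrides (merge_method_grids base overrides)

-- ===== LEMMAS AND PROOFS =====

theorem t1 {ν : Type} (l : List (String × ν)) (k k' : String) (h : k' ≠ k) :
    (PySem.Dict.mk (l.filter (fun q => q.1 != k))).get? k' = (PySem.Dict.mk l).get? k' := by
  induction l with
  | nil => rfl
  | cons p rest ih =>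
    obtain ⟨a, v⟩ := p
    by_cases hp : a = k
    · subst hp
      simp [PySem.Dict.get?_mk_cons, Ne.symm h, ih]
    · simp [hp, PySem.Dict.get?_mk_cons, ih]

theorem pvL1 {ν : Type} (op : List (String × ν)) (d : PySem.Dict String ν)
    (hop : (op.map Prod.fst).Nodup) :
    (op.foldl (fun e q => e.insert q.1 q.2) d).items
      = d.items.map (fun p => (p.1, (PySem.Dict.mk op).getD p.1 p.2))
        ++ op.filter (fun q => !(d.contains q.1)) := by
  induction op generalizing d with
  | nil =>
    have hnone : ∀ x : String, (PySem.Dict.mk ([] : List (String × ν))).get? x = none := fun _ => rfl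
    simp [PySem.Dict.getD_eq_get?_getD, hnone]
  | cons hd rest ih =>
    obtain ⟨k, w⟩ := hd
    simp only [List.map_cons, List.nodup_cons] at hop
    obtain ⟨hk, hrest⟩ := hop
    have hkrest : (PySem.Dict.mk rest).get? k = none := by
      rw [PySem.Dict.get?_eq_none_iff_not_mem_keys]; simpa using hk
    simp only [List.foldl_cons]
    rw [ih (d.insert k w) hrest]
    have hfilt : rest.filter (fun q => !((d.insert k w).contains q.1))
        = rest.filter (fun q => !(d.contains q.1)) := by
      apply List.filter_congr
      intro q hq
      have : q.1 ≠ k := by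
        intro he; exact hk (he ▸ (List.mem_map_of_mem hq))
      simp [PySem.Dict.contains_insert, this]
    rw [hfilt]
    by_cases hc : d.contains k = true
    · rw [PySem.Dict.items_insert_of_contains _ _ hc, List.map_map]
      have hhead : ((k, w) :: rest).filter (fun q => !(d.contains q.1))
          = rest.filter (fun q => !(d.contains q.1)) := by
        simp [hc]
      rw [hhead]
      congr 1
      apply List.map_congr_left
      intro p _
      by_cases hp : p.1 = k
      · simp [hp, PySem.Dict.get?_mk_cons, PySem.Dict.getD_eq_get?_getD, hkrest]
      · simp [hp, Ne.symm hp, PySem.Dict.get?_mk_cons, PySem.Dict.getD_eq_get?_getD]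
    · rw [PySem.Dict.items_insert_of_not_contains _ _ (by simpa using hc), List.map_append]
      have hknotmem : ∀ p ∈ d.items, p.1 ≠ k := by
        intro p hp he
        apply hc
        rw [PySem.Dict.contains_iff_mem_keys]
        simp only [PySem.Dict.keys]
        exact he ▸ List.mem_map_of_mem hp
      have hhead : ((k, w) :: rest).filter (fun q => !(d.contains q.1))
          = (k, w) :: rest.filter (fun q => !(d.contains q.1)) := by
        simp [hc]
      rw [hhead]
      have hmap : d.items.map (fun p => (p.1, (PySem.Dict.mk rest).getD p.1 p.2))
          = d.items.map (fun p => (p.1, (PySem.Dict.mk ((k, w) :: rest)).getD p.1 p.2)) := by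
        apply List.map_congr_left
        intro p hp
        simp [PySem.Dict.get?_mk_cons, PySem.Dict.getD_eq_get?_getD, Ne.symm (hknotmem p hp)]
      rw [hmap]
      simp [PySem.Dict.getD_eq_get?_getD, hkrest]

def pvCanon {ν : Type} (bp op : List (String × ν)) : List (String × ν) :=
  bp.map (fun q => (q.1, (PySem.Dict.mk op).getD q.1 q.2))
    ++ op.filter (fun q => !((bp.map Prod.fst).contains q.1))

theorem t2' {ν : Type} (l : List (String × ν)) (h : (l.map Prod.fst).Nodup) :
    (l.foldl (fun d q => d.insert q.1 q.2) PySem.Dict.empty).items = l := by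
  have := PySem.Dict.items_foldl_insert_fresh (d := (PySem.Dict.empty : PySem.Dict String ν)) l Prod.fst Prod.snd (by intro a _; rfl) h
  simpa using this

theorem t3' {ν : Type} (l : List (String × ν)) (k : String) :
    (l.foldl (fun d q => d.insert q.1 q.2) PySem.Dict.empty).contains k = (l.map Prod.fst).contains k := by
  rw [PySem.Dict.contains_eq_decide_mem_keys, PySem.Dict.keys_foldl_insert_key]
  simp [PySem.Set.update_nil_left, PySem.Set.mem_ofList]

theorem pvAInner {ν : Type} (bp op : List (String × ν))
    (hbp : (bp.map Prod.fst).Nodup) (hop : (op.map Prod.fst).Nodup) :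
    (op.foldl (fun e q => e.insert q.1 q.2)
        (bp.foldl (fun e q => e.insert q.1 q.2) PySem.Dict.empty)).items = pvCanon bp op := by
  rw [pvL1 _ _ hop, t2' _ hbp, pvCanon]
  congr 1
  apply List.filter_congr
  intro q _
  rw [t3']

theorem pvNewStep {ν : Type} (k : String) (x : ν) (restm : List (String × ν))
    (hfresh : ∀ p ∈ restm, p.1 ≠ k) (hnd : (restm.map Prod.fst).Nodup) :
    (restm.foldl (fun d q => d.insert q.1 q.2) (PySem.Dict.empty.insert k x)).items
      = (k, x) :: restm := by
  have := PySem.Dict.items_foldl_insert_fresh (d := (PySem.Dict.empty : PySem.Dict String ν).insert k x)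
      restm Prod.fst Prod.snd
      (by intro a ha
          simp [PySem.Dict.contains_insert, hfresh a ha]) hnd
  simpa using this

theorem pvCanon_map_fst {ν : Type} (bp op : List (String × ν)) :
    (pvCanon bp op).map Prod.fst
      = bp.map Prod.fst ++ (op.filter (fun q => !((bp.map Prod.fst).contains q.1))).map Prod.fst := by
  simp [pvCanon]

theorem pvCanon_nodup {ν : Type} (bp op : List (String × ν))
    (hbp : (bp.map Prod.fst).Nodup) (hop : (op.map Prod.fst).Nodup) :
    ((pvCanon bp op).map Prod.fst).Nodup := by
  rw [pvCanon_map_fst]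
  apply List.Nodup.append hbp
  · exact hop.sublist (List.filter_sublist.map Prod.fst)
  · intro a ha hb
    obtain ⟨q, hq, rfl⟩ := List.mem_map.mp hb
    have hq2 : ((bp.map Prod.fst).contains q.1) = false := by
      simpa using (List.mem_filter.mp hq).2
    have : q.1 ∉ bp.map Prod.fst := by
      intro hmem
      rw [List.contains_eq_mem, decide_eq_true hmem] at hq2
      exact (by simp at hq2)
    exact this ha

theorem pvNewInner (bp op : List (String × List Int))
    (hbp : (bp.map Prod.fst).Nodup) (hop : (op.map Prod.fst).Nodup) :
    pvMergeParams bp op = pvCanon bp op := by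
  induction bp generalizing op with
  | nil => simp [pvMergeParams, pvCanon, t2' _ hop]
  | cons hd rest ih =>
    obtain ⟨k, v⟩ := hd
    simp only [List.map_cons, List.nodup_cons] at hbp
    obtain ⟨hk, hrest⟩ := hbp
    have hop' : ((op.filter (fun q => q.1 != k)).map Prod.fst).Nodup :=
      hop.sublist (List.filter_sublist.map Prod.fst)
    rw [pvMergeParams, ih _ hrest hop']
    rw [pvNewStep]
    · rw [pvCanon, pvCanon]
      have hmap : rest.map (fun q => (q.1, (PySem.Dict.mk (op.filter (fun r => r.1 != k))).getD q.1 q.2))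
          = rest.map (fun q => (q.1, (PySem.Dict.mk op).getD q.1 q.2)) := by
        apply List.map_congr_left
        intro q hq
        have hne : q.1 ≠ k := by
          intro he; exact hk (he ▸ List.mem_map_of_mem (f := Prod.fst) hq)
        rw [PySem.Dict.getD_eq_get?_getD, PySem.Dict.getD_eq_get?_getD, t1 _ _ _ hne]
      have hfilt : (op.filter (fun q => q.1 != k)).filter (fun q => !((rest.map Prod.fst).contains q.1))
          = op.filter (fun q => !((((k, v) :: rest).map Prod.fst).contains q.1)) := by
        rw [List.filter_filter]
        apply List.filter_congr
        intro q _
        simp [Bool.and_comm, bne]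
      rw [hmap, hfilt]
      simp
    · intro p hp
      rw [pvCanon] at hp
      rcases List.mem_append.mp hp with h | h
      · obtain ⟨q, hq, rfl⟩ := List.mem_map.mp h
        simp only [ne_eq]
        intro he
        apply hk
        rw [← he]
        exact List.mem_map_of_mem (f := Prod.fst) hq
      · have := (List.mem_filter.mp h).1
        have h2 := List.mem_filter.mp this
        simpa using h2.2
    · exact pvCanon_nodup _ _ hrest hop'

def pvCanonOuter (b o : List (String × List (String × List Int))) : List (String × List (String × List Int)) :=
  b.map (fun p => (p.1, pvCanon p.2 ((PySem.Dict.mk o).getD p.1 [])))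
    ++ o.filter (fun q => !((b.map Prod.fst).contains q.1))

theorem pv_getD_inner_nodup (o : List (String × List (String × List Int)))
    (hoi : ∀ p ∈ o, (p.2.map Prod.fst).Nodup) (m : String) :
    ((((PySem.Dict.mk o).getD m []) : List (String × List Int)).map Prod.fst).Nodup := by
  rw [PySem.Dict.getD_eq_get?_getD]
  cases h : (PySem.Dict.mk o).get? m with
  | none => simp
  | some v =>
    have hm := PySem.Dict.mem_items_of_get?_eq_some _ h
    exact hoi _ hm

theorem pvCanonOuter_nodup (b o : List (String × List (String × List Int)))
    (hb : (b.map Prod.fst).Nodup) (ho : (o.map Prod.fst).Nodup) :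
    ((pvCanonOuter b o).map Prod.fst).Nodup := by
  have hfst : (pvCanonOuter b o).map Prod.fst
      = b.map Prod.fst ++ (o.filter (fun q => !((b.map Prod.fst).contains q.1))).map Prod.fst := by
    simp [pvCanonOuter]
  rw [hfst]
  apply List.Nodup.append hb
  · exact ho.sublist (List.filter_sublist.map Prod.fst)
  · intro a ha hbmem
    obtain ⟨q, hq, rfl⟩ := List.mem_map.mp hbmem
    have hq2 : ((b.map Prod.fst).contains q.1) = false := by
      simpa using (List.mem_filter.mp hq).2
    have : q.1 ∉ b.map Prod.fst := by
      intro hmem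
      rw [List.contains_eq_mem, decide_eq_true hmem] at hq2
      exact (by simp at hq2)
    exact this ha

theorem pvNewOuter (b o : List (String × List (String × List Int)))
    (hb : (b.map Prod.fst).Nodup) (hbi : ∀ p ∈ b, (p.2.map Prod.fst).Nodup)
    (ho : (o.map Prod.fst).Nodup) (hoi : ∀ p ∈ o, (p.2.map Prod.fst).Nodup) :
    pvMergeOuter b o = pvCanonOuter b o := by
  induction b generalizing o with
  | nil =>
    have hfold := PySem.Dict.items_foldl_insert_fresh (d := (PySem.Dict.empty : PySem.Dict String (List (String × List Int))))
      o Prod.fst (fun q => (q.2.foldl (fun e r => e.insert r.1 r.2) PySem.Dict.empty).items)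
      (by intro a _; rfl) ho
    rw [pvMergeOuter, hfold, pvCanonOuter]
    have h3 : o.map (fun q => ((q : String × List (String × List Int)).1, (q.2.foldl (fun e r => e.insert r.1 r.2) PySem.Dict.empty).items)) = o := by
      rw [List.map_congr_left (g := fun q => (q.1, q.2)) (fun q hq => by simp [t2' _ (hoi q hq)])]
      simp
    simp [h3, show (PySem.Dict.empty : PySem.Dict String (List (String × List Int))).items = [] from rfl]
  | cons hd rest ih =>
    obtain ⟨m, params⟩ := hd
    simp only [List.map_cons, List.nodup_cons] at hb
    obtain ⟨hm, hrest⟩ := hb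
    have ho' : ((o.filter (fun q => q.1 != m)).map Prod.fst).Nodup :=
      ho.sublist (List.filter_sublist.map Prod.fst)
    have hoi' : ∀ p ∈ o.filter (fun q => q.1 != m), (p.2.map Prod.fst).Nodup :=
      fun p hp => hoi p (List.mem_of_mem_filter hp)
    rw [pvMergeOuter, ih _ hrest (fun p hp => hbi p (List.mem_cons_of_mem _ hp)) ho' hoi']
    rw [pvNewInner _ _ (hbi _ (List.mem_cons_self)) (pv_getD_inner_nodup o hoi m)]
    rw [pvNewStep]
    · rw [pvCanonOuter, pvCanonOuter]
      have hmap : rest.map (fun p => (p.1, pvCanon p.2 ((PySem.Dict.mk (o.filter (fun q => q.1 != m))).getD p.1 [])))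
          = rest.map (fun p => (p.1, pvCanon p.2 ((PySem.Dict.mk o).getD p.1 []))) := by
        apply List.map_congr_left
        intro p hp
        have hne : p.1 ≠ m := by
          intro he; exact hm (he ▸ List.mem_map_of_mem (f := Prod.fst) hp)
        rw [PySem.Dict.getD_eq_get?_getD, PySem.Dict.getD_eq_get?_getD, t1 _ _ _ hne]
      have hfilt : (o.filter (fun q => q.1 != m)).filter (fun q => !((rest.map Prod.fst).contains q.1))
          = o.filter (fun q => !((((m, params) :: rest).map Prod.fst).contains q.1)) := by
        rw [List.filter_filter]
        apply List.filter_congr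
        intro q _
        simp [Bool.and_comm, bne]
      rw [hmap, hfilt]
      simp
    · intro p hp
      rw [pvCanonOuter] at hp
      rcases List.mem_append.mp hp with h | h
      · obtain ⟨q, hq, rfl⟩ := List.mem_map.mp h
        simp only [ne_eq]
        intro he
        apply hm
        rw [← he]
        exact List.mem_map_of_mem (f := Prod.fst) hq
      · have := (List.mem_filter.mp h).1
        have h2 := List.mem_filter.mp this
        simpa using h2.2
    · exact pvCanonOuter_nodup _ _ hrest ho'

def pvInnerIns (e : PySem.Dict String (List Int)) (q : String × List Int) : PySem.Dict String (List Int) :=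
  e.insert q.1 q.2

theorem pv_modfold_getD (l : List (String × List Int)) (a : String) (m : PySem.Dict String (PySem.Dict String (List Int))) (k : String) :
    (l.foldl (fun m2 q => m2.modify a PySem.Dict.empty (fun e => e.insert q.1 q.2)) m).getD k PySem.Dict.empty =
      if k = a then l.foldl pvInnerIns (m.getD a PySem.Dict.empty) else m.getD k PySem.Dict.empty := by
  induction l generalizing m with
  | nil => simp; intro h; rw [h]
  | cons q rest ih =>
    simp only [List.foldl_cons, ih, PySem.Dict.getD_modify]
    by_cases h : k = a <;> simp [h, pvInnerIns]

def pvStepA (m : PySem.Dict String (PySem.Dict String (List Int))) (p : String × List (String × List Int)) : PySem.Dict String (PySem.Dict String (List Int)) :=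
  p.2.foldl (fun m2 q => m2.modify p.1 PySem.Dict.empty (fun e => e.insert q.1 q.2))
    (m.setdefault p.1 PySem.Dict.empty)

theorem pvStepA_getD (m : PySem.Dict String (PySem.Dict String (List Int))) (p : String × List (String × List Int)) (k : String) :
    (pvStepA m p).getD k PySem.Dict.empty =
      if k = p.1 then p.2.foldl pvInnerIns (m.getD p.1 PySem.Dict.empty)
      else m.getD k PySem.Dict.empty := by
  unfold pvStepA
  rw [pv_modfold_getD]
  by_cases h : k = p.1
  · simp [h, PySem.Dict.getD_setdefault_self]
  · simp [h, PySem.Dict.getD_eq_get?_getD, PySem.Dict.get?_setdefault_of_ne _ _ h]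

theorem pv_ofold_getD (o : List (String × List (String × List Int))) (ho : (o.map Prod.fst).Nodup) (m : PySem.Dict String (PySem.Dict String (List Int))) (k : String) :
    (o.foldl pvStepA m).getD k PySem.Dict.empty =
      ((PySem.Dict.mk o).getD k []).foldl pvInnerIns (m.getD k PySem.Dict.empty) := by
  induction o generalizing m with
  | nil => rfl
  | cons p rest ih =>
    simp only [List.map_cons, List.nodup_cons] at ho
    obtain ⟨hp, hrest⟩ := ho
    simp only [List.foldl_cons]
    rw [ih hrest]
    by_cases h : k = p.1
    · have hnone : (PySem.Dict.mk rest).get? k = none := by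
        rw [PySem.Dict.get?_eq_none_iff_not_mem_keys, PySem.Dict.keys_mk]
        rw [h]; exact hp
      rw [PySem.Dict.getD_eq_get?_getD (PySem.Dict.mk rest), hnone]
      rw [PySem.Dict.getD_eq_get?_getD (PySem.Dict.mk (p :: rest)), PySem.Dict.get?_mk_cons]
      simp [h, pvStepA_getD]
    · rw [PySem.Dict.getD_eq_get?_getD (PySem.Dict.mk (p :: rest)), PySem.Dict.get?_mk_cons]
      have hne : (p.1 == k) = false := by simp [Ne.symm h]
      rw [hne, pvStepA_getD]
      simp [h, PySem.Dict.getD_eq_get?_getD]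

def pvInnerOf (l : List (String × List Int)) : PySem.Dict String (List Int) :=
  l.foldl pvInnerIns PySem.Dict.empty
def pvInsB (m : PySem.Dict String (PySem.Dict String (List Int))) (p : String × List (String × List Int)) : PySem.Dict String (PySem.Dict String (List Int)) :=
  m.insert p.1 (pvInnerOf p.2)

theorem pv_bfold_getD_aux (b : List (String × List (String × List Int))) (hb : (b.map Prod.fst).Nodup) (m0 : PySem.Dict String (PySem.Dict String (List Int))) (k : String) :
    (b.foldl pvInsB m0).getD k PySem.Dict.empty =
      match (PySem.Dict.mk b).get? k with
      | some v => pvInnerOf v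
      | none => m0.getD k PySem.Dict.empty := by
  induction b generalizing m0 with
  | nil => rfl
  | cons p rest ih =>
    simp only [List.map_cons, List.nodup_cons] at hb
    obtain ⟨hp, hrest⟩ := hb
    simp only [List.foldl_cons]
    rw [ih hrest]
    rw [PySem.Dict.get?_mk_cons]
    by_cases h : p.1 = k
    · have hnone : (PySem.Dict.mk rest).get? k = none := by
        rw [PySem.Dict.get?_eq_none_iff_not_mem_keys, PySem.Dict.keys_mk]
        rw [← h]; exact hp
      subst h
      simp [hnone, pvInsB]
    · have hne : (p.1 == k) = false := by simp [h]
      rw [hne]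
      cases hg : (PySem.Dict.mk rest).get? k with
      | some v => simp
      | none => simp [pvInsB, PySem.Dict.getD_insert, Ne.symm h]

theorem pv_bfold_getD (b : List (String × List (String × List Int))) (hb : (b.map Prod.fst).Nodup) (k : String) :
    (b.foldl pvInsB PySem.Dict.empty).getD k PySem.Dict.empty =
      pvInnerOf ((PySem.Dict.mk b).getD k []) := by
  rw [pv_bfold_getD_aux b hb, PySem.Dict.getD_eq_get?_getD (PySem.Dict.mk b)]
  cases hg : (PySem.Dict.mk b).get? k <;> rfl

theorem pv_modfold_keys (l : List (String × List Int)) (a : String) (m : PySem.Dict String (PySem.Dict String (List Int))) (hc : m.contains a = true) :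
    (l.foldl (fun m2 q => m2.modify a PySem.Dict.empty (fun e => e.insert q.1 q.2)) m).keys = m.keys := by
  induction l generalizing m with
  | nil => rfl
  | cons q rest ih =>
    simp only [List.foldl_cons]
    rw [ih _ (by simp [PySem.Dict.contains_modify, hc])]
    rw [PySem.Dict.keys_modify, PySem.Dict.keys_insert_of_contains _ _ hc]

theorem pvStepA_keys (m : PySem.Dict String (PySem.Dict String (List Int))) (p : String × List (String × List Int)) :
    (pvStepA m p).keys = PySem.Set.add m.keys p.1 := by
  unfold pvStepA
  rw [pv_modfold_keys _ _ _ (by simp [PySem.Dict.contains_setdefault])]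
  rw [PySem.Dict.keys_setdefault]
  by_cases h : m.contains p.1 = true
  · rw [if_pos h, PySem.Set.add_of_mem ((PySem.Dict.contains_iff_mem_keys m p.1).mp h)]
  · rw [if_neg h, PySem.Set.add_of_not_mem]
    intro hmem
    exact h ((PySem.Dict.contains_iff_mem_keys m p.1).mpr hmem)

theorem pv_ofold_keys (o : List (String × List (String × List Int))) (m : PySem.Dict String (PySem.Dict String (List Int))) :
    (o.foldl pvStepA m).keys = o.foldl (fun ks p => PySem.Set.add ks p.1) m.keys := by
  induction o generalizing m with
  | nil => rfl
  | cons p rest ih => simp only [List.foldl_cons, ih, pvStepA_keys]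

theorem pv_split (b o : List (String × List (String × List Int))) :
    (o.map (fun p => p.1)).filter (fun mid => !((PySem.Dict.mk b).contains mid))
      = (o.filter (fun q => !((PySem.Dict.mk b).contains q.1))).map Prod.fst := by
  induction o with
  | nil => rfl
  | cons q rest ih =>
    simp only [List.map_cons, List.filter_cons]
    cases h : (!(PySem.Dict.mk b).contains q.1) <;> simp [h] <;> simpa using ih

theorem pvOldCanon (b o : List (String × List (String × List Int)))
    (hb : (b.map Prod.fst).Nodup) (hbi : ∀ p ∈ b, (p.2.map Prod.fst).Nodup)
    (ho : (o.map Prod.fst).Nodup) (hoi : ∀ p ∈ o, (p.2.map Prod.fst).Nodup) :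
    merge_method_grids (some b) (some o) = pvCanonOuter b o := by
  show (o.foldl pvStepA (b.foldl pvInsB PySem.Dict.empty)).items.map (fun p => (p.1, p.2.items)) = _
  set M1 := b.foldl pvInsB PySem.Dict.empty with hM1
  set M2 := o.foldl pvStepA M1 with hM2
  have horder : (b.map (fun p => p.1))
        ++ ((o.map (fun p => p.1)).filter (fun mid => !((PySem.Dict.mk b).contains mid)))
      = o.foldl (fun ks p => PySem.Set.add ks p.1) (b.map (fun p => p.1)) := by
    rw [← PySem.Set.update_map_eq_foldl_add, PySem.Set.update_eq_append_filter]
    congr 1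
    rw [PySem.Set.ofList_eq_self_of_nodup _ ho]
    apply List.filter_congr
    intro y _
    simp [PySem.Set.contains_eq_listContains, PySem.Dict.contains_eq_decide_mem_keys,
      PySem.Dict.keys_mk]
  have hM1keys : M1.keys = b.map (fun p => p.1) := by
    rw [hM1]
    rw [show (b.foldl pvInsB PySem.Dict.empty)
        = b.foldl (fun d x => d.insert x.1 ((fun (_ : PySem.Dict String (PySem.Dict String (List Int))) (x : String × List (String × List Int)) => pvInnerOf x.2) d x)) PySem.Dict.empty from rfl]
    rw [PySem.Dict.keys_foldl_insert_key]
    rw [PySem.Dict.keys_empty, PySem.Set.update_nil_left]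
    exact PySem.Set.ofList_eq_self_of_nodup _ hb
  have hkeys : M2.keys = o.foldl (fun ks p => PySem.Set.add ks p.1) (b.map (fun p => p.1)) := by
    rw [hM2, pv_ofold_keys, hM1keys]
  have hnodup : (o.foldl (fun ks p => PySem.Set.add ks p.1) (b.map (fun p => p.1))).Nodup := by
    rw [← PySem.Set.update_map_eq_foldl_add]
    exact PySem.Set.nodup_update _ _ hb
  have hknodup : M2.keys.Nodup := by rw [hkeys]; exact hnodup
  rw [PySem.Dict.items_eq_map_keys M2 hknodup PySem.Dict.empty, hkeys, List.map_map]
  rw [← horder, List.map_append]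
  have hcontains : ∀ k : String, (PySem.Dict.mk b).contains k = (b.map Prod.fst).contains k := by
    intro k
    rw [PySem.Dict.contains_eq_decide_mem_keys, PySem.Dict.keys_mk, List.contains_eq_mem]
  have hMgetD : ∀ k : String, (M2.getD k PySem.Dict.empty)
      = ((PySem.Dict.mk o).getD k []).foldl pvInnerIns (pvInnerOf ((PySem.Dict.mk b).getD k [])) := by
    intro k
    rw [hM2, pv_ofold_getD o ho, hM1, pv_bfold_getD b hb]
  rw [pvCanonOuter]
  congr 1
  · -- head part over base keys
    rw [show b.map (fun p => p.1) = b.map Prod.fst from rfl, List.map_map]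
    apply List.map_congr_left
    intro p hp
    have hbmem : ((PySem.Dict.mk b).getD p.1 []) = p.2 :=
      PySem.Dict.getD_of_mem_items _ (by exact hp) (by simpa using hb) []
    simp only [Function.comp_apply]
    rw [hMgetD p.1, hbmem]
    have : (((PySem.Dict.mk o).getD p.1 []).foldl pvInnerIns (pvInnerOf p.2)).items
        = pvCanon p.2 ((PySem.Dict.mk o).getD p.1 []) := by
      have e1 : pvInnerIns = (fun e q => e.insert q.1 q.2) := rfl
      have e2 : pvInnerOf p.2 = p.2.foldl (fun e q => e.insert q.1 q.2) PySem.Dict.empty := rfl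
      rw [e1, e2]
      exact pvAInner p.2 _ (hbi p hp) (pv_getD_inner_nodup o hoi p.1)
    rw [this]
  · -- tail part over override-only keys
    have hsplit : (o.map (fun p => p.1)).filter (fun mid => !((PySem.Dict.mk b).contains mid))
        = (o.filter (fun q => !((PySem.Dict.mk b).contains q.1))).map Prod.fst := pv_split b o
    rw [hsplit, List.map_map]
    have hfilt : o.filter (fun q => !((PySem.Dict.mk b).contains q.1))
        = o.filter (fun q => !((b.map Prod.fst).contains q.1)) := by
      apply List.filter_congr
      intro q _
      rw [hcontains]
    rw [← hfilt]
    have hend : ∀ q ∈ o.filter (fun q => !((PySem.Dict.mk b).contains q.1)),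
        (((fun p => ((p : String × PySem.Dict String (List Int)).1, p.2.items)) ∘ fun k => (k, M2.getD k PySem.Dict.empty)) ∘ Prod.fst) q = q := by
      intro q hq
      obtain ⟨hqo, hqc⟩ := List.mem_filter.mp hq
      have hc0 : (PySem.Dict.mk b).contains q.1 = false := by simpa using hqc
      simp only [Function.comp_apply]
      rw [hMgetD q.1]
      rw [PySem.Dict.getD_of_not_contains _ _ hc0]
      have hoG : ((PySem.Dict.mk o).getD q.1 []) = q.2 :=
        PySem.Dict.getD_of_mem_items _ (by exact hqo) (by simpa using ho) []
      rw [hoG]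
      have e1 : pvInnerIns = (fun e q => e.insert q.1 q.2) := rfl
      have e2 : pvInnerOf [] = PySem.Dict.empty := rfl
      rw [e1, e2, t2' _ (hoi q hqo)]
    calc _ = (o.filter (fun q => !((PySem.Dict.mk b).contains q.1))).map id := List.map_congr_left hend
    _ = _ := by simp

-- ===== VERDICT (by name: the statement is the Claim_ definition above) =====
theorem merge_method_grids_spec : Claim_equal_merge_method_grids := by
  intro base overrides _hdom hpre
  unfold Spec_merge_method_grids merge_method_grids_alt
  obtain ⟨⟨hb, hbi⟩, ho, hoi⟩ := hpre
  rw [pvNewOuter _ _ hb hbi ho hoi]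
  have := pvOldCanon (base.getD []) (overrides.getD []) hb hbi ho hoi
  rw [← this]
  cases base <;> cases overrides <;> rfl
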